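-- pv_equiv track=rewrite | github.com/arpuvs/RFG | Common/ADI_GPIB/TEK_HFS9003.py | dectobin_SDIO
-- ===== SOURCE A (Python) =====
-- def dectobin_SDIO(dec=0,bits=8):
--     '''This is a modified function of the written dectobin function to double each bit coming out, since each
--     bit in the SDIO vector needs to be repeated twice so that it is at the correct data rate'''
--     i=0
--     string = ''
--     while (i<bits):
--         bit = str(dec%2)
--         string = bit + bit + string     # Modified this line to add the bit twice
--         dec = dec >> 1
--         i = i+1
--     return string
-- ===== SOURCE B (Python) =====
-- def dectobin_SDIO(dec=0, bits=8):
--     # Two-phase: mask to the low `bits` bits, format as fixed-width binary, then double each char.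
--     if bits <= 0:
--         return ''
--     n = dec % (1 << bits)
--     s = format(n, '0{}b'.format(bits))
--     return ''.join(c * 2 for c in s)
-- ===== Notes on version B (the rewrite author's own statement) =====
-- stated objective: idiomatic
-- what changed: Replaces A's single LSB-first loop that interleaves bit extraction with doubled-bit prepending (quadratic repeated string prepending in Python) by a two-phase computation: mask to the low `bits` bits with a modulus, render the fixed-width MSB-first binary string with format(), then double every character in one join pass.
import Mathlib
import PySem

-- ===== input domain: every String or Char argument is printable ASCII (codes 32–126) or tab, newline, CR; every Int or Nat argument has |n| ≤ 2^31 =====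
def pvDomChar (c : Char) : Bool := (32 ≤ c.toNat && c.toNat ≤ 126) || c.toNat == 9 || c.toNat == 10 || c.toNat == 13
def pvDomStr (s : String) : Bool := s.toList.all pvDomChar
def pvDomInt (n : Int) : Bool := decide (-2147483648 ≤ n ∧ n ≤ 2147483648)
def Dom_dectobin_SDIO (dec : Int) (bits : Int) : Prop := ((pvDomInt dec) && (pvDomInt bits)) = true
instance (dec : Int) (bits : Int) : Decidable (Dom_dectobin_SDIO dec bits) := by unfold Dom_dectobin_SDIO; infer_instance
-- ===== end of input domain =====

-- B computes the masked value's fixed-width binary string first and doubles each character in a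
-- second pass (two-phase, MSB-first), instead of A's single LSB-first extract-and-prepend loop;
-- objective: idiomatic two-phase decomposition (a timing run measured B faster in Python).


-- ===== PORT A =====
-- while (i < bits): runs (max bits 0) times; Int.toNat clamps negatives to 0, which is exactly
-- that iteration count. State: current dec and the accumulated string (as List Char).
def dectobinLoopA : Nat → Int → List Char → List Char
  | 0, _, string => string
  | k + 1, dec, string =>
      let bit := PySem.Int.toChars (PySem.Int.mod dec 2)   -- bit = str(dec % 2)
      dectobinLoopA k (dec >>> (1:Nat)) (bit ++ bit ++ string)   -- string = bit + bit + string; dec = dec >> 1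

def dectobin_SDIO (dec : Int) (bits : Int) : String :=
  String.ofList (dectobinLoopA bits.toNat dec [])

-- ===== PORT B =====
-- format(n, '0{k}b'): the k-character zero-padded binary string of n, MSB first
-- (exact for 0 ≤ n < 2^k, which the caller guarantees via the modulus).
def fmtBin : Nat → Nat → List Char
  | 0, _ => []
  | k + 1, n => fmtBin k (n / 2) ++ [if n % 2 = 1 then '1' else '0']

def dectobin_SDIO_alt (dec : Int) (bits : Int) : String :=
  if bits ≤ 0 then "" else
    let n := (PySem.Int.mod dec ((1 : Int) <<< bits.toNat)).toNat  -- n = dec % (1 << bits)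
    let s := fmtBin bits.toNat n                                   -- s = format(n, '0{bits}b')
    String.ofList (s.flatMap (fun c => [c, c]))                        -- ''.join(c*2 for c in s)

-- ===== PRECONDITION & SPEC =====
def Spec_dectobin_SDIO (dec : Int) (bits : Int) (out : String) : Prop := out = dectobin_SDIO_alt dec bits
instance (dec : Int) (bits : Int) (out : String) : Decidable (Spec_dectobin_SDIO dec bits out) := by unfold Spec_dectobin_SDIO; infer_instance

-- ===== CLAIM (what is proved, stated in full; the proofs are below) =====
def Claim_equal_dectobin_SDIO : Prop := ∀ (dec : Int) (bits : Int), Dom_dectobin_SDIO dec bits → Spec_dectobin_SDIO dec bits (dectobin_SDIO dec bits)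

-- ===== LEMMAS AND PROOFS =====

-- Splitting the low k+1 bits of dec: dec mod 2^(k+1) = 2 * ((dec >> 1) mod 2^k) + (dec mod 2).
lemma emod_two_pow_succ (dec : Int) (k : Nat) :
    dec % (2 ^ (k + 1) : Int) = 2 * ((dec / 2) % (2 ^ k : Int)) + dec % 2 := by
  have hpow : (2:Int) ^ (k+1) = 2 * 2 ^ k := by ring
  have hm : (0:Int) < 2 ^ k := by positivity
  have hb0 : (0:Int) ≤ dec % 2 := Int.emod_nonneg dec (by norm_num)
  have hb1 : dec % 2 < 2 := Int.emod_lt_of_pos dec (by norm_num)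
  have hq0 : (0:Int) ≤ (dec / 2) % 2 ^ k := Int.emod_nonneg _ (by positivity)
  have hq1 : (dec / 2) % 2 ^ k < 2 ^ k := Int.emod_lt_of_pos _ hm
  have h1 : dec / 2 * 2 + dec % 2 = dec := Int.ediv_mul_add_emod dec 2
  have h2 : dec / 2 / 2 ^ k * 2 ^ k + (dec / 2) % 2 ^ k = dec / 2 := Int.ediv_mul_add_emod _ _
  have hdec : dec = (2 * ((dec / 2) % 2 ^ k) + dec % 2) + (2 ^ (k+1)) * (dec / 2 / 2 ^ k) := by
    rw [hpow]; linear_combination -h1 - 2 * h2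
  calc dec % 2 ^ (k+1)
      = ((2 * ((dec / 2) % 2 ^ k) + dec % 2) + (2 ^ (k+1)) * (dec / 2 / 2 ^ k)) % 2 ^ (k+1) := by
        rw [← hdec]
    _ = (2 * ((dec / 2) % 2 ^ k) + dec % 2) % 2 ^ (k+1) := by rw [Int.add_mul_emod_self_left]
    _ = _ := Int.emod_eq_of_lt (by omega) (by omega)

-- Loop invariant: A's loop over k iterations produces the doubled k-bit binary of dec mod 2^k,
-- prepended to the accumulator.
lemma loopA_eq (k : Nat) : ∀ (dec : Int) (acc : List Char),
    dectobinLoopA k dec acc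
      = (fmtBin k (dec % (2 ^ k : Int)).toNat).flatMap (fun c => [c, c]) ++ acc := by
  induction k with
  | zero => intro dec acc; simp [dectobinLoopA, fmtBin]
  | succ k ih =>
    intro dec acc
    have hshift : dec >>> (1:Nat) = dec / 2 := by simp [Int.shiftRight_eq_div_pow]
    have hmod2 : PySem.Int.mod dec 2 = dec % 2 := PySem.Int.mod_eq_emod_of_pos (by norm_num)
    have hsplit := emod_two_pow_succ dec k
    have hq0 : (0:Int) ≤ (dec / 2) % 2 ^ k := Int.emod_nonneg _ (by positivity)
    have hb0 : (0:Int) ≤ dec % 2 := Int.emod_nonneg dec (by norm_num)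
    have hdiv : (dec % (2 ^ (k+1) : Int)).toNat / 2 = ((dec / 2) % (2 ^ k : Int)).toNat := by
      omega
    have hmod : (dec % (2 ^ (k+1) : Int)).toNat % 2 = (dec % 2).toNat := by
      omega
    show dectobinLoopA k (dec >>> (1:Nat))
        (PySem.Int.toChars (PySem.Int.mod dec 2) ++ PySem.Int.toChars (PySem.Int.mod dec 2) ++ acc)
      = _
    rw [ih, hshift, hmod2]
    show _ = (fmtBin k ((dec % (2 ^ (k+1) : Int)).toNat / 2)
        ++ [if (dec % (2 ^ (k+1) : Int)).toNat % 2 = 1 then '1' else '0']).flatMap (fun c => [c, c]) ++ acc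
    rw [hdiv, hmod, List.flatMap_append]
    have hc0 : PySem.Int.toChars (0:Int) = ['0'] := by decide
    have hc1 : PySem.Int.toChars (1:Int) = ['1'] := by decide
    rcases Int.emod_two_eq_zero_or_one dec with h | h <;>
      simp [h, hc0, hc1, List.flatMap]

-- ===== VERDICT (by name: the statement is the Claim_ definition above) =====
theorem dectobin_SDIO_spec : Claim_equal_dectobin_SDIO := by
  intro dec bits _
  unfold Spec_dectobin_SDIO dectobin_SDIO dectobin_SDIO_alt
  by_cases hb : bits ≤ 0
  · have : bits.toNat = 0 := by omega
    simp [this, hb, dectobinLoopA]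
  · rw [if_neg hb]
    have h1 : ((1 : Int) <<< bits.toNat) = 2 ^ bits.toNat := by rw [Int.shiftLeft_eq]; ring
    have h2 : PySem.Int.mod dec ((1 : Int) <<< bits.toNat) = dec % (2 ^ bits.toNat : Int) := by
      rw [h1, PySem.Int.mod_eq_emod_of_pos (by positivity)]
    rw [h2, loopA_eq, List.append_nil]
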